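-- pv_equiv track=rewrite | github.com/miliar/Code_Jam_Webscraper | Solutions_python/Problem_35/315.py | alphalabel
-- ===== SOURCE A (Python) =====
-- def alphalabel(sink_chart,num_sinks):
--     labels = []
--     ascii = 97
--     for x in range(num_sinks+1):
--         labels.append("")
--     for i in range(len(sink_chart)):
--         for j in range(len(sink_chart[0])):
--             sink = sink_chart[i][j]
--             if labels[sink] == "":
--                 labels[sink] = chr(ascii)
--                 ascii = ascii + 1
--             sink_chart[i][j] = labels[sink]
--     return sink_chart
-- ===== SOURCE B (Python) =====
-- def alphalabel(sink_chart, num_sinks):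
--     # Two passes: first build the sink -> letter table, then apply it.
--     labels = [""] * (num_sinks + 1)
--     code = 97
--     width = len(sink_chart[0]) if sink_chart else 0
--     for row in sink_chart:
--         for j in range(width):
--             s = row[j]
--             if labels[s] == "":
--                 labels[s] = chr(code)
--                 code += 1
--     for row in sink_chart:
--         for j in range(width):
--             row[j] = labels[row[j]]
--     return sink_chart
-- ===== Notes on version B (the rewrite author's own statement) =====
-- stated objective: simpler
-- what changed: A interleaves assigning the next letter to a sink and rewriting the cell in one pass; B first scans the grid once to build the complete sink-to-letter table, then applies the table to every cell in a second pass.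
-- outside the precondition, e.g. on alphalabel([[0], [0, 1]], 1): A returns [['a'], ['a', 1]], B returns [['a'], ['a', 1]]
import Mathlib
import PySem

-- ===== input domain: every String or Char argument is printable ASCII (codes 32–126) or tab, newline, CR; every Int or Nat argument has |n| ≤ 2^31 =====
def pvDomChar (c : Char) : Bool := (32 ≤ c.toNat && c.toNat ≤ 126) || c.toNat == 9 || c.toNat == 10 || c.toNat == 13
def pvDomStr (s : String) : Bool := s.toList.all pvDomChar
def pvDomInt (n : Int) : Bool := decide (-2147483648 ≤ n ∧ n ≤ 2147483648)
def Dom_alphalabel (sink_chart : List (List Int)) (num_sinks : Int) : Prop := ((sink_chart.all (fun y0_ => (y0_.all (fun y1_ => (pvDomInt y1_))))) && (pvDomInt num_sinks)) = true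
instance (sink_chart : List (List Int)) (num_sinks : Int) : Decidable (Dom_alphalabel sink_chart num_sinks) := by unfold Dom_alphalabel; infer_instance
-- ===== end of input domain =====

-- B replaces A's single interleaved assign-and-apply pass by two separate passes
-- (build the sink→letter table first, then apply it to every cell); same cost, clearer.
-- Both Pythons mutate sink_chart in place identically; the theorems are about the return value.

-- ===== PORT A =====
def alphalabel (sink_chart : List (List Int)) (num_sinks : Int) : List (List String) :=
  let labels0 : List String :=
    (PySem.List.pyRange 0 (num_sinks + 1) 1).foldl (fun acc _ => acc ++ [""]) []
  let width := (sink_chart.headD []).length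
  let res :=
    sink_chart.foldl
      (fun (st : List String × Int × List (List String)) (row : List Int) =>
        let inner :=
          (List.range width).foldl
            (fun (st2 : List String × Int × List String) (j : Nat) =>
              let sink := PySem.List.pyGetD row (j : Int) 0
              let p : List String × Int :=
                if PySem.List.pyGetD st2.1 sink "" = "" then
                  (PySem.List.pySetD st2.1 sink (String.singleton (Char.ofNat st2.2.1.toNat)),
                   st2.2.1 + 1)
                else (st2.1, st2.2.1)
              (p.1, p.2, st2.2.2 ++ [PySem.List.pyGetD p.1 sink ""]))
            (st.1, st.2.1, ([] : List String))
        (inner.1, inner.2.1, st.2.2 ++ [inner.2.2]))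
      (labels0, (97 : Int), ([] : List (List String)))
  res.2.2

-- ===== PORT B =====
def alphalabel_alt (sink_chart : List (List Int)) (num_sinks : Int) : List (List String) :=
  let labels0 : List String := List.replicate (num_sinks + 1).toNat ""
  let width := (sink_chart.headD []).length
  -- pass 1: build the table
  let p :=
    sink_chart.foldl
      (fun (p : List String × Int) (row : List Int) =>
        (List.range width).foldl
          (fun (p : List String × Int) (j : Nat) =>
            let s := PySem.List.pyGetD row (j : Int) 0
            if PySem.List.pyGetD p.1 s "" = "" then
              (PySem.List.pySetD p.1 s (String.singleton (Char.ofNat p.2.toNat)), p.2 + 1)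
            else p)
          p)
      (labels0, (97 : Int))
  -- pass 2: apply it
  sink_chart.map (fun (row : List Int) =>
    (List.range width).foldl
      (fun (acc : List String) (j : Nat) =>
        acc ++ [PySem.List.pyGetD p.1 (PySem.List.pyGetD row (j : Int) 0) ""])
      ([] : List String))

-- ===== PRECONDITION & SPEC =====
-- Pre_ excludes exactly the inputs where Python A does not return a list-of-lists-of-strings:
-- a row shorter than row 0 or a sink index outside the labels list raises IndexError, and a row
-- LONGER than row 0 makes A return a mixed int/str row, which is not a value of the declared type.
def Pre_alphalabel (sink_chart : List (List Int)) (num_sinks : Int) : Prop :=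
  (∀ row ∈ sink_chart, row.length = (sink_chart.headD []).length) ∧
  (∀ row ∈ sink_chart, ∀ s ∈ row, -(num_sinks + 1) ≤ s ∧ s < num_sinks + 1)
instance (sink_chart : List (List Int)) (num_sinks : Int) : Decidable (Pre_alphalabel sink_chart num_sinks) := by
  unfold Pre_alphalabel; infer_instance

def pvWitness_alphalabel : List (List Int) × Int := ([[0, 1], [1, 2]], 2)

def Spec_alphalabel (sink_chart : List (List Int)) (num_sinks : Int) (out : List (List String)) : Prop := out = alphalabel_alt sink_chart num_sinks
instance (sink_chart : List (List Int)) (num_sinks : Int) (out : List (List String)) : Decidable (Spec_alphalabel sink_chart num_sinks out) := by unfold Spec_alphalabel; infer_instance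

-- ===== CLAIM (what is proved, stated in full; the proofs are below) =====
def Claim_equal_alphalabel : Prop := ∀ (sink_chart : List (List Int)) (num_sinks : Int), Dom_alphalabel sink_chart num_sinks → Pre_alphalabel sink_chart num_sinks → Spec_alphalabel sink_chart num_sinks (alphalabel sink_chart num_sinks)

-- ===== LEMMAS AND PROOFS =====

-- the per-cell update of the label table (defeq to the step both ports' loops perform)
def cellStep (row : List Int) (p : List String × Int) (j : Nat) : List String × Int :=
  if PySem.List.pyGetD p.1 (PySem.List.pyGetD row (j : Int) 0) "" = "" then
    (PySem.List.pySetD p.1 (PySem.List.pyGetD row (j : Int) 0)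
      (String.singleton (Char.ofNat p.2.toNat)), p.2 + 1)
  else p

def rowAgen (row : List Int) (js : List Nat) (st : List String × Int × List String) :
    List String × Int × List String :=
  js.foldl
    (fun (st2 : List String × Int × List String) (j : Nat) =>
      let p := cellStep row (st2.1, st2.2.1) j
      (p.1, p.2, st2.2.2 ++ [PySem.List.pyGetD p.1 (PySem.List.pyGetD row (j : Int) 0) ""]))
    st

def chartA (sc : List (List Int)) (w : Nat) (st : List String × Int × List (List String)) :
    List String × Int × List (List String) :=
  sc.foldl
    (fun (st : List String × Int × List (List String)) (row : List Int) =>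
      let inner := rowAgen row (List.range w) (st.1, st.2.1, [])
      (inner.1, inner.2.1, st.2.2 ++ [inner.2.2]))
    st

def chartB (sc : List (List Int)) (w : Nat) (p : List String × Int) : List String × Int :=
  sc.foldl (fun (p : List String × Int) (row : List Int) =>
    (List.range w).foldl (cellStep row) p) p

def applyRow (L : List String) (w : Nat) (row : List Int) : List String :=
  (List.range w).foldl
    (fun (acc : List String) (j : Nat) =>
      acc ++ [PySem.List.pyGetD L (PySem.List.pyGetD row (j : Int) 0) ""]) []

-- "L' extends L": same length, and every already-assigned (nonempty) slot keeps its value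
def LabExt (L L' : List String) : Prop :=
  L.length = L'.length ∧
  ∀ t : Int, PySem.List.pyGetD L t "" ≠ "" → PySem.List.pyGetD L' t "" = PySem.List.pyGetD L t ""

theorem labExt_refl (L : List String) : LabExt L L := ⟨rfl, fun _ _ => rfl⟩

theorem labExt_trans {L M N : List String} (h1 : LabExt L M) (h2 : LabExt M N) : LabExt L N := by
  refine ⟨h1.1.trans h2.1, fun t ht => ?_⟩
  have := h1.2 t ht
  rw [h2.2 t (by rw [this]; exact ht), this]

theorem pyGet?_idx {α : Type} (xs : List α) (i : Int) :
    PySem.List.pyGet? xs i = (PySem.List.pyIdx? xs.length i).bind (fun k => xs[k]?) := by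
  simp [PySem.List.pyGet?, PySem.List.pyIdx?]

theorem idx_lt {n : Nat} {i : Int} {k : Nat} (h : PySem.List.pyIdx? n i = some k) : k < n := by
  unfold PySem.List.pyIdx? at h
  split_ifs at h
  all_goals first
    | exact Option.noConfusion h
    | (injection h with h; omega)

theorem getD_setD_self {xs : List String} {i : Int} (v : String)
    (h : PySem.Raise.InRange xs.length i) :
    PySem.List.pyGetD (PySem.List.pySetD xs i v) i "" = v := by
  have hidx : ∃ k, PySem.List.pyIdx? xs.length i = some k := by
    obtain ⟨h1, h2⟩ := h
    by_cases h0 : 0 ≤ i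
    · exact ⟨i.toNat, by unfold PySem.List.pyIdx?; rw [if_pos h0, if_pos h2]⟩
    · exact ⟨xs.length - (-i).toNat, by unfold PySem.List.pyIdx?; rw [if_neg h0, if_pos h1]⟩
  obtain ⟨k, hk⟩ := hidx
  have hklt : k < xs.length := idx_lt hk
  have hset : PySem.List.pySetD xs i v = xs.set k v := by
    simp [PySem.List.pySetD, PySem.List.pySet?, hk]
  rw [hset]
  simp [PySem.List.pyGetD, pyGet?_idx, List.length_set, hk, hklt]

theorem getD_setD_other {xs : List String} {s t : Int} (v : String)
    (h : PySem.List.pyGetD xs s "" ≠ PySem.List.pyGetD xs t "") :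
    PySem.List.pyGetD (PySem.List.pySetD xs s v) t "" = PySem.List.pyGetD xs t "" := by
  cases hks : PySem.List.pyIdx? xs.length s with
  | none => simp [PySem.List.pySetD, PySem.List.pySet?, hks]
  | some ks =>
    have hset : PySem.List.pySetD xs s v = xs.set ks v := by
      simp [PySem.List.pySetD, PySem.List.pySet?, hks]
    rw [hset]
    cases hkt : PySem.List.pyIdx? xs.length t with
    | none =>
      simp [PySem.List.pyGetD, pyGet?_idx, List.length_set, hkt]
    | some kt =>
      have hne : ks ≠ kt := by
        intro he
        apply h
        simp [PySem.List.pyGetD, pyGet?_idx, hks, hkt, he]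
      simp [PySem.List.pyGetD, pyGet?_idx, List.length_set, hkt, List.getElem?_set_ne hne]

theorem cellStep_len (row : List Int) (p : List String × Int) (j : Nat) :
    (cellStep row p j).1.length = p.1.length := by
  unfold cellStep
  split_ifs <;> simp [PySem.List.length_pySetD]

theorem singleton_ne_empty (c : Char) : String.singleton c ≠ "" := by
  intro h
  have := congrArg String.toList h
  simp at this

theorem cellStep_ext (row : List Int) (p : List String × Int) (j : Nat) :
    LabExt p.1 (cellStep row p j).1 := by
  unfold cellStep
  split_ifs with hb
  · refine ⟨(PySem.List.length_pySetD ..).symm, fun t ht => ?_⟩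
    exact getD_setD_other _ (by rw [hb]; exact fun he => ht he.symm)
  · exact labExt_refl _

theorem cellStep_get_ne (row : List Int) (p : List String × Int) (j : Nat)
    (h : PySem.Raise.InRange p.1.length (PySem.List.pyGetD row (j : Int) 0)) :
    PySem.List.pyGetD (cellStep row p j).1 (PySem.List.pyGetD row (j : Int) 0) "" ≠ "" := by
  by_cases hb : PySem.List.pyGetD p.1 (PySem.List.pyGetD row (j : Int) 0) "" = ""
  · have he : (cellStep row p j).1 =
        PySem.List.pySetD p.1 (PySem.List.pyGetD row (j : Int) 0)
          (String.singleton (Char.ofNat p.2.toNat)) := by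
      unfold cellStep; rw [if_pos hb]
    rw [he, getD_setD_self _ h]
    exact singleton_ne_empty _
  · have he : (cellStep row p j).1 = p.1 := by unfold cellStep; rw [if_neg hb]
    rw [he]; exact hb

theorem foldl_cellStep_len (row : List Int) :
    ∀ (js : List Nat) (p : List String × Int),
      (js.foldl (cellStep row) p).1.length = p.1.length := by
  intro js
  induction js with
  | nil => intro p; rfl
  | cons j js ih => intro p; rw [List.foldl_cons, ih, cellStep_len]

theorem foldl_cellStep_ext (row : List Int) :
    ∀ (js : List Nat) (p : List String × Int), LabExt p.1 (js.foldl (cellStep row) p).1 := by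
  intro js
  induction js with
  | nil => intro p; exact labExt_refl _
  | cons j js ih =>
    intro p
    exact labExt_trans (cellStep_ext row p j) (ih (cellStep row p j))

theorem chartB_ext (w : Nat) :
    ∀ (sc : List (List Int)) (p : List String × Int), LabExt p.1 (chartB sc w p).1 := by
  intro sc
  induction sc with
  | nil => intro p; exact labExt_refl _
  | cons row sc ih =>
    intro p
    exact labExt_trans (foldl_cellStep_ext row (List.range w) p) (ih _)

theorem rowA_key (row : List Int) :
    ∀ (js : List Nat) (p : List String × Int) (out : List String) (L' : List String),
      (∀ j ∈ js, PySem.Raise.InRange p.1.length (PySem.List.pyGetD row (j : Int) 0)) →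
      LabExt (js.foldl (cellStep row) p).1 L' →
      rowAgen row js (p.1, p.2, out) =
        ((js.foldl (cellStep row) p).1, (js.foldl (cellStep row) p).2,
          out ++ js.map (fun (j : Nat) =>
            PySem.List.pyGetD L' (PySem.List.pyGetD row (j : Int) 0) "")) := by
  intro js
  induction js with
  | nil => intro p out L' _ _; simp [rowAgen]
  | cons j js ih =>
    intro p out L' hin hext
    have hstep : rowAgen row (j :: js) (p.1, p.2, out) =
        rowAgen row js ((cellStep row p j).1, (cellStep row p j).2,
          out ++ [PySem.List.pyGetD (cellStep row p j).1 (PySem.List.pyGetD row (j : Int) 0) ""]) := by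
      rfl
    rw [hstep]
    have hin' : ∀ j' ∈ js, PySem.Raise.InRange (cellStep row p j).1.length
        (PySem.List.pyGetD row (j' : Int) 0) := by
      intro j' hj'
      rw [cellStep_len]
      exact hin j' (List.mem_cons_of_mem _ hj')
    have hfold : js.foldl (cellStep row) (cellStep row p j) =
        (j :: js).foldl (cellStep row) p := rfl
    have hext' : LabExt (js.foldl (cellStep row) (cellStep row p j)).1 L' := by
      rw [hfold]; exact hext
    rw [ih (cellStep row p j) _ L' hin' hext']
    have hkeep : PySem.List.pyGetD L' (PySem.List.pyGetD row (j : Int) 0) "" =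
        PySem.List.pyGetD (cellStep row p j).1 (PySem.List.pyGetD row (j : Int) 0) "" := by
      have hne := cellStep_get_ne row p j (hin j (List.mem_cons_self ..))
      have h1 := foldl_cellStep_ext row js (cellStep row p j)
      have h2 := labExt_trans h1 hext'
      exact h2.2 _ hne
    rw [hfold]
    simp only [List.map_cons]
    rw [hkeep]
    simp [List.append_assoc]

theorem foldl_app_map (f : Nat → String) :
    ∀ (l : List Nat) (acc : List String),
      l.foldl (fun (acc : List String) (j : Nat) => acc ++ [f j]) acc = acc ++ l.map f := by
  intro l
  induction l with
  | nil => intro acc; simp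
  | cons x l ih => intro acc; simp [ih]

theorem applyRow_eq_map (L : List String) (w : Nat) (row : List Int) :
    applyRow L w row =
      (List.range w).map (fun (j : Nat) =>
        PySem.List.pyGetD L (PySem.List.pyGetD row (j : Int) 0) "") := by
  unfold applyRow
  rw [foldl_app_map (fun (j : Nat) => PySem.List.pyGetD L (PySem.List.pyGetD row (j : Int) 0) "")]
  simp

theorem chartA_key (w : Nat) :
    ∀ (sc : List (List Int)) (p : List String × Int) (outs : List (List String)),
      (∀ row ∈ sc, ∀ j ∈ List.range w,
        PySem.Raise.InRange p.1.length (PySem.List.pyGetD row (j : Int) 0)) →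
      chartA sc w (p.1, p.2, outs) =
        ((chartB sc w p).1, (chartB sc w p).2,
          outs ++ sc.map (applyRow (chartB sc w p).1 w)) := by
  intro sc
  induction sc with
  | nil => intro p outs _; simp [chartA, chartB]
  | cons row sc ih =>
    intro p outs hin
    have hq : chartB (row :: sc) w p = chartB sc w ((List.range w).foldl (cellStep row) p) := rfl
    have hrow := rowA_key row (List.range w) p [] (chartB (row :: sc) w p).1
      (fun j hj => hin row (List.mem_cons_self ..) j hj)
      (by rw [hq]; exact chartB_ext w sc _)
    have hmid : chartA (row :: sc) w (p.1, p.2, outs) =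
        chartA sc w (((List.range w).foldl (cellStep row) p).1,
          ((List.range w).foldl (cellStep row) p).2,
          outs ++ [(List.range w).map (fun (j : Nat) =>
            PySem.List.pyGetD (chartB (row :: sc) w p).1
              (PySem.List.pyGetD row (j : Int) 0) "")]) := by
      show chartA sc w ((rowAgen row (List.range w) (p.1, p.2, [])).1,
        (rowAgen row (List.range w) (p.1, p.2, [])).2.1,
        outs ++ [(rowAgen row (List.range w) (p.1, p.2, [])).2.2]) = _
      rw [hrow]
      rfl
    rw [hmid]
    have hin' : ∀ r ∈ sc, ∀ j ∈ List.range w,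
        PySem.Raise.InRange ((List.range w).foldl (cellStep row) p).1.length
          (PySem.List.pyGetD r (j : Int) 0) := by
      intro r hr j hj
      rw [foldl_cellStep_len]
      exact hin r (List.mem_cons_of_mem _ hr) j hj
    rw [ih ((List.range w).foldl (cellStep row) p) _ hin']
    rw [hq]
    simp [applyRow_eq_map, List.append_assoc]

theorem replicate_from_fold :
    ∀ (l : List Int) (acc : List String),
      l.foldl (fun acc _ => acc ++ [""]) acc = acc ++ List.replicate l.length "" := by
  intro l
  induction l with
  | nil => intro acc; simp
  | cons x l ih => intro acc; simp [ih, List.replicate_succ]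

theorem labels0_eq (n : Int) :
    (PySem.List.pyRange 0 (n + 1) 1).foldl (fun acc _ => acc ++ [""]) [] =
      List.replicate (n + 1).toNat "" := by
  rw [replicate_from_fold]
  simp [PySem.List.length_pyRange_one]

theorem alphalabel_eq_chartA (sc : List (List Int)) (n : Int) :
    alphalabel sc n =
      (chartA sc (sc.headD []).length
        ((PySem.List.pyRange 0 (n + 1) 1).foldl (fun acc _ => acc ++ [""]) [], 97, [])).2.2 := rfl

theorem alphalabel_alt_eq (sc : List (List Int)) (n : Int) :
    alphalabel_alt sc n =
      sc.map (applyRow (chartB sc (sc.headD []).length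
        (List.replicate (n + 1).toNat "", 97)).1 (sc.headD []).length) := rfl

-- ===== VERDICT (by name: the statement is the Claim_ definition above) =====
theorem alphalabel_spec : Claim_equal_alphalabel := by
  intro sc n _ hpre
  unfold Spec_alphalabel
  obtain ⟨hlen, hrange⟩ := hpre
  rw [alphalabel_eq_chartA, labels0_eq, alphalabel_alt_eq]
  have hin : ∀ row ∈ sc, ∀ j ∈ List.range (sc.headD []).length,
      PySem.Raise.InRange (List.replicate (n + 1).toNat ("" : String)).length
        (PySem.List.pyGetD row (j : Int) 0) := by
    intro row hrow j hj
    rw [List.mem_range] at hj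
    have hjlt : j < row.length := by rw [hlen row hrow]; exact hj
    have hcell : PySem.List.pyGetD row (j : Int) 0 = row[j] := by
      simp [List.getD_eq_getElem?_getD, List.getElem?_eq_getElem hjlt]
    have hmem : row[j] ∈ row := List.getElem_mem hjlt
    have hb := hrange row hrow _ hmem
    rw [hcell]
    simp only [List.length_replicate, PySem.Raise.InRange]
    omega
  have hmain := chartA_key (sc.headD []).length sc
    (List.replicate (n + 1).toNat "", 97) [] hin
  have h2 := congrArg (fun t : List String × Int × List (List String) => t.2.2) hmain
  simp only at h2
  rw [h2]
  simp
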